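-- pv_equiv track=rewrite | github.com/alicavus/softuni-learn-archive | Softuni Python/Softuni Python Advanced/01. Lists as Stacks and Queues/Exercise/05. Truck Tour.py | complete_circle
-- ===== SOURCE A (Python) =====
-- def complete_circle(pumps_conf: list) -> bool:
--     fuel = 0
--     for cur_station in pumps_conf:
--         fuel += cur_station[0]
--         if fuel < cur_station[1]:
--             return False
--         fuel -= cur_station[1]
--
--     return True
-- ===== SOURCE B (Python) =====
-- def complete_circle(pumps_conf: list) -> bool:
--     # Decomposition: net gain per station, then check every prefix sum is nonnegative.
--     nets = [p - c for p, c in pumps_conf]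
--     return all(sum(nets[:i + 1]) >= 0 for i in range(len(nets)))
-- ===== Notes on version B (the rewrite author's own statement) =====
-- stated objective: alternative
-- what changed: B reframes the fused fuel-accumulator loop with early return as a declarative check that every prefix sum of the per-station net gains (pump - cost) is nonnegative, separating data (nets, prefix slices) from the invariant (all >= 0).
import Mathlib
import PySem

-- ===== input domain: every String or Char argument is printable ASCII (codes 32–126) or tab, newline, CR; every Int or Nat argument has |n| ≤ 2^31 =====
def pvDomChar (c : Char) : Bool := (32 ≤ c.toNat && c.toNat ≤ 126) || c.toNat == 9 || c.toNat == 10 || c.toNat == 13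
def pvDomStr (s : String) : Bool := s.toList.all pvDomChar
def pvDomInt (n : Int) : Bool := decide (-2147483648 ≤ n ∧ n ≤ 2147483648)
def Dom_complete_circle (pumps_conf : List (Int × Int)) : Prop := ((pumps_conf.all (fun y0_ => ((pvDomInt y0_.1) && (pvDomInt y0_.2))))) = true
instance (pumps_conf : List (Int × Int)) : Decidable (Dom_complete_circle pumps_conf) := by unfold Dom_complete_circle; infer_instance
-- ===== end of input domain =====

-- B replaces the fused fuel-accumulator loop by a declarative check that every
-- prefix sum of the per-station net gains is nonnegative (alternative decomposition).

-- ===== PORT A =====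
def completeGo (fuel : Int) : List (Int × Int) → Bool
  | [] => true
  | s :: rest =>
    let fuel := fuel + s.1
    if fuel < s.2 then false
    else completeGo (fuel - s.2) rest

def complete_circle (pumps_conf : List (Int × Int)) : Bool :=
  completeGo 0 pumps_conf

-- ===== PORT B =====
def complete_circle_alt (pumps_conf : List (Int × Int)) : Bool :=
  let nets := pumps_conf.map (fun p => p.1 - p.2)
  (PySem.List.pyRange 0 nets.length 1).all
    (fun i => decide (0 ≤ (PySem.List.slice nets none (some (i + 1))).sum))

-- ===== PRECONDITION & SPEC =====
def Spec_complete_circle (pumps_conf : List (Int × Int)) (out : Bool) : Prop := out = complete_circle_alt pumps_conf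
instance (pumps_conf : List (Int × Int)) (out : Bool) : Decidable (Spec_complete_circle pumps_conf out) := by unfold Spec_complete_circle; infer_instance

-- ===== CLAIM (what is proved, stated in full; the proofs are below) =====
def Claim_equal_complete_circle : Prop := ∀ (pumps_conf : List (Int × Int)), Dom_complete_circle pumps_conf → Spec_complete_circle pumps_conf (complete_circle pumps_conf)

-- ===== LEMMAS AND PROOFS =====

-- prefix-sum characterisation shared by both ports
def prefOk (f : Int) (l : List (Int × Int)) : Bool :=
  (List.range l.length).all
    (fun k => decide (0 ≤ f + ((l.map (fun s => s.1 - s.2)).take (k + 1)).sum))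

theorem completeGo_eq_prefOk (l : List (Int × Int)) (f : Int) :
    completeGo f l = prefOk f l := by
  induction l generalizing f with
  | nil => simp [completeGo, prefOk]
  | cons s rest ih =>
    simp only [completeGo, prefOk, List.length_cons, List.range_succ_eq_map,
      List.all_cons, List.all_map, List.map_cons, List.take_succ_cons,
      List.sum_cons, List.take_zero, List.sum_nil]
    by_cases h : f + s.1 < s.2
    · simp only [if_pos h, Bool.false_eq, Bool.and_eq_false_iff,
        decide_eq_false_iff_not]
      left; omega
    · rw [if_neg h, ih, prefOk]
      rw [Bool.eq_iff_iff]
      simp only [Bool.and_eq_true, List.all_eq_true,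
        decide_eq_true_eq, List.mem_range, Function.comp_apply,
        Nat.succ_eq_add_one]
      constructor
      · intro H
        refine ⟨by omega, ?_⟩
        intro k hk
        have := H k hk
        omega
      · rintro ⟨_, H⟩ k hk
        have := H k hk
        omega

theorem alt_eq_prefOk (l : List (Int × Int)) :
    complete_circle_alt l = prefOk 0 l := by
  simp only [complete_circle_alt, prefOk, PySem.List.pyRange_one]
  rw [List.all_map]
  simp only [Int.sub_zero, Int.toNat_natCast, List.length_map]
  rw [Bool.eq_iff_iff]
  simp only [List.all_eq_true, decide_eq_true_eq,
    List.mem_range, Function.comp_apply]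
  constructor
  · intro H k hk
    have := H k hk
    rw [show (0 : Int) + (k : Int) + 1 = ((k + 1 : Nat) : Int) by push_cast; ring,
      PySem.List.slice_to_natCast] at this
    omega
  · intro H k hk
    rw [show (0 : Int) + (k : Int) + 1 = ((k + 1 : Nat) : Int) by push_cast; ring,
      PySem.List.slice_to_natCast]
    have := H k hk
    omega

-- ===== VERDICT (by name: the statement is the Claim_ definition above) =====
theorem complete_circle_spec : Claim_equal_complete_circle := by
  intro l _
  unfold Spec_complete_circle complete_circle
  rw [completeGo_eq_prefOk, alt_eq_prefOk]
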